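-- pv_equiv track=rewrite | github.com/Neumenon/glyph | py/glyph/loose.py | is_bare_safe
-- ===== SOURCE A (Python) =====
-- BARE_SAFE_CHARS = set("abcdefghijklmnopqrstuvwxyzABCDEFGHIJKLMNOPQRSTUVWXYZ0123456789_-./+@")
--
-- BARE_START_CHARS = set("abcdefghijklmnopqrstuvwxyzABCDEFGHIJKLMNOPQRSTUVWXYZ_")
--
-- RESERVED_WORDS = {"t", "f", "true", "false", "null", "nil", "_"}
--
-- def is_bare_safe(s: str) -> bool:
--     """Check if string can be emitted as bare (unquoted) identifier."""
--     if not s: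
--         return False
--     if s in RESERVED_WORDS:
--         return False
--     if s[0] not in BARE_START_CHARS:
--         return False
--     # Check if it looks like a number
--     if s[0].isdigit() or (s[0] == '-' and len(s) > 1 and s[1].isdigit()):
--         return False
--     for c in s:
--         if c not in BARE_SAFE_CHARS:
--             return False
--     return True
-- ===== SOURCE B (Python) =====
-- import re
--
-- RESERVED_WORDS = {"t", "f", "true", "false", "null", "nil", "_"}
--
-- _BARE = re.compile(r'[A-Za-z_][-A-Za-z0-9_./+@]*')
--
-- def is_bare_safe(s: str) -> bool:
--     """Check if string can be emitted as bare (unquoted) identifier."""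
--     if not s:
--         return False
--     if s in RESERVED_WORDS:
--         return False
--     return _BARE.fullmatch(s) is not None
-- ===== Notes on version B (the rewrite author's own statement) =====
-- stated objective: idiomatic
-- what changed: Replaces A's per-character set-membership scan with its dead number-check branches by the early guards plus a single compiled regex full-match r'[A-Za-z_][-A-Za-z0-9_./+@]*'.
import Mathlib
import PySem

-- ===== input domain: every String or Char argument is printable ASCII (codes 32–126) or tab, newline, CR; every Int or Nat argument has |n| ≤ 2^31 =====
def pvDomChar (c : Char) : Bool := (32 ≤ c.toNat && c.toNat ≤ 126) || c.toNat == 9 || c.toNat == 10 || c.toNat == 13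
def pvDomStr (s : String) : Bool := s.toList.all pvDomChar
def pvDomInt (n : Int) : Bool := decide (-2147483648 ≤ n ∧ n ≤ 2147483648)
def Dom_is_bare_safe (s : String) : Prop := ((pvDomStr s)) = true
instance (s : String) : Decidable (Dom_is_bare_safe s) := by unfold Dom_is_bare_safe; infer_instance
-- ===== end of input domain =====

-- B replaces A's set-membership scan (with its dead number-check branches) by a single
-- regex-style full match: head char in [A-Za-z_], every further char in [-A-Za-z0-9_./+@];
-- objective: idiomatic/simpler, same O(n) cost.

-- ===== PORT A =====
def pvBareSafeChars : PySem.Set Char :=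
  PySem.Set.ofList "abcdefghijklmnopqrstuvwxyzABCDEFGHIJKLMNOPQRSTUVWXYZ0123456789_-./+@".toList

def pvBareStartChars : PySem.Set Char :=
  PySem.Set.ofList "abcdefghijklmnopqrstuvwxyzABCDEFGHIJKLMNOPQRSTUVWXYZ_".toList

def pvReservedWords : PySem.Set String :=
  PySem.Set.ofList ["t", "f", "true", "false", "null", "nil", "_"]

-- A's 'for c in s: if c not in BARE_SAFE_CHARS: return False' loop
def pvBareLoop : List Char → Bool
  | [] => true
  | c :: rest =>
      if ¬ (PySem.Set.contains pvBareSafeChars c) then false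
      else pvBareLoop rest

def is_bare_safe (s : String) : Bool :=
  match s.toList with
  | [] => false                      -- if not s
  | c0 :: rest =>
      if PySem.Set.contains pvReservedWords s then false     -- if s in RESERVED_WORDS
      else if ¬ (PySem.Set.contains pvBareStartChars c0) then false   -- s[0] not in BARE_START_CHARS
      -- if s[0].isdigit() or (s[0] == '-' and len(s) > 1 and s[1].isdigit())
      else if PySem.Chars.isdigit c0
              || (c0 == '-' && (match rest with
                                | c1 :: _ => PySem.Chars.isdigit c1   -- len(s) > 1 and s[1].isdigit()
                                | [] => false)) then false
      else pvBareLoop (c0 :: rest)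

-- ===== PORT B =====
-- the regex character classes of r'[A-Za-z_][-A-Za-z0-9_./+@]*', as code-point tests
def pvReAlpha (n : Nat) : Bool := (65 ≤ n && n ≤ 90) || (97 ≤ n && n ≤ 122)

def pvReStart (c : Char) : Bool := pvReAlpha c.toNat || c.toNat == 95

def pvReCont (c : Char) : Bool :=
  c.toNat == 45 || pvReAlpha c.toNat || (48 ≤ c.toNat && c.toNat ≤ 57)
    || c.toNat == 95 || c.toNat == 46 || c.toNat == 47 || c.toNat == 43 || c.toNat == 64

-- _BARE.fullmatch(s) is not None
def pvReFullmatch : List Char → Bool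
  | [] => false
  | c :: rest => pvReStart c && rest.all pvReCont

def is_bare_safe_alt (s : String) : Bool :=
  if s.toList = [] then false
  else if ["t", "f", "true", "false", "null", "nil", "_"].contains s then false
  else pvReFullmatch s.toList

-- ===== PRECONDITION & SPEC =====
def Spec_is_bare_safe (s : String) (out : Bool) : Prop := out = is_bare_safe_alt s
instance (s : String) (out : Bool) : Decidable (Spec_is_bare_safe s out) := by unfold Spec_is_bare_safe; infer_instance

-- ===== CLAIM (what is proved, stated in full; the proofs are below) =====
def Claim_equal_is_bare_safe : Prop := ∀ (s : String), Dom_is_bare_safe s → Spec_is_bare_safe s (is_bare_safe s)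

-- ===== LEMMAS AND PROOFS =====

theorem pv_chr_beq (a c : Char) : (a == c) = (a.toNat == c.toNat) := by
  rw [Bool.eq_iff_iff]
  simp only [beq_iff_eq]
  exact ⟨fun h => h ▸ rfl, fun h => Char.ext (UInt32.toNat_inj.mp h)⟩

theorem pv_contains_toNat (l : List Char) (c : Char) :
    l.contains c = (l.map Char.toNat).contains c.toNat := by
  induction l with
  | nil => rfl
  | cons a t ih => simp only [List.contains_cons, List.map_cons, ih, pv_chr_beq]

set_option maxRecDepth 8192 in
theorem pv_start_chars_eq :
    pvBareStartChars.map Char.toNat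
      = [97, 98, 99, 100, 101, 102, 103, 104, 105, 106, 107, 108, 109, 110, 111, 112, 113,
         114, 115, 116, 117, 118, 119, 120, 121, 122, 65, 66, 67, 68, 69, 70, 71, 72, 73,
         74, 75, 76, 77, 78, 79, 80, 81, 82, 83, 84, 85, 86, 87, 88, 89, 90, 95] := by
  decide

set_option maxRecDepth 8192 in
theorem pv_safe_chars_eq :
    pvBareSafeChars.map Char.toNat
      = [97, 98, 99, 100, 101, 102, 103, 104, 105, 106, 107, 108, 109, 110, 111, 112, 113,
         114, 115, 116, 117, 118, 119, 120, 121, 122, 65, 66, 67, 68, 69, 70, 71, 72, 73,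
         74, 75, 76, 77, 78, 79, 80, 81, 82, 83, 84, 85, 86, 87, 88, 89, 90, 48, 49, 50,
         51, 52, 53, 54, 55, 56, 57, 95, 45, 46, 47, 43, 64] := by
  decide

set_option maxRecDepth 8192 in
theorem pv_start_mem (c : Char) :
    PySem.Set.contains pvBareStartChars c = pvReStart c := by
  show List.contains pvBareStartChars c = pvReStart c
  rw [pv_contains_toNat, pv_start_chars_eq, Bool.eq_iff_iff]
  simp only [pvReStart, pvReAlpha, List.contains_cons, List.contains_nil, Bool.or_false,
    Bool.or_eq_true, Bool.and_eq_true, beq_iff_eq, decide_eq_true_eq]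
  omega

set_option maxRecDepth 8192 in
theorem pv_safe_mem (c : Char) :
    PySem.Set.contains pvBareSafeChars c = pvReCont c := by
  show List.contains pvBareSafeChars c = pvReCont c
  rw [pv_contains_toNat, pv_safe_chars_eq, Bool.eq_iff_iff]
  simp only [pvReCont, pvReAlpha, List.contains_cons, List.contains_nil, Bool.or_false,
    Bool.or_eq_true, Bool.and_eq_true, beq_iff_eq, decide_eq_true_eq]
  omega

theorem pv_start_not_digit (c : Char) (h : pvReStart c = true) :
    PySem.Chars.isdigit c = false := by
  simp only [pvReStart, pvReAlpha, Bool.or_eq_true, Bool.and_eq_true, beq_iff_eq,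
    decide_eq_true_eq] at h
  unfold PySem.Chars.isdigit
  rw [← Bool.decide_and, decide_eq_false_iff_not]
  rintro ⟨h1, h2⟩
  simp only [Char.le_def, UInt32.le_iff_toNat_le, Char.reduceVal, UInt32.reduceToNat,
    Char.toNat_val] at h1 h2
  omega

theorem pv_start_not_dash (c : Char) (h : pvReStart c = true) : (c == '-') = false := by
  simp only [pvReStart, pvReAlpha, Bool.or_eq_true, Bool.and_eq_true, beq_iff_eq,
    decide_eq_true_eq] at h
  rw [pv_chr_beq]
  have h45 : '-'.toNat = 45 := rfl
  rw [h45]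
  simp only [beq_eq_false_iff_ne, ne_eq]
  omega

theorem pv_start_cont (c : Char) (h : pvReStart c = true) : pvReCont c = true := by
  simp only [pvReStart, pvReAlpha, Bool.or_eq_true, Bool.and_eq_true, beq_iff_eq,
    decide_eq_true_eq] at h
  simp only [pvReCont, pvReAlpha, Bool.or_eq_true, Bool.and_eq_true, beq_iff_eq,
    decide_eq_true_eq]
  omega

theorem pv_loop_all (cs : List Char) : pvBareLoop cs = cs.all pvReCont := by
  induction cs with
  | nil => rfl
  | cons c rest ih =>
      rw [pvBareLoop, pv_safe_mem, List.all_cons, ih]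
      by_cases h : pvReCont c = true
      · simp [h]
      · simp [Bool.eq_false_iff.mpr h]

set_option maxRecDepth 8192 in
theorem pv_reserved_list :
    (pvReservedWords : List String) = ["t", "f", "true", "false", "null", "nil", "_"] := by
  decide

theorem pv_reserved_eq (s : String) :
    PySem.Set.contains pvReservedWords s
      = (["t", "f", "true", "false", "null", "nil", "_"] : List String).contains s := by
  show List.contains pvReservedWords s = _
  rw [pv_reserved_list]

-- ===== VERDICT (by name: the statement is the Claim_ definition above) =====
theorem is_bare_safe_spec : Claim_equal_is_bare_safe := by
  intro s _
  show is_bare_safe s = is_bare_safe_alt s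
  unfold is_bare_safe is_bare_safe_alt
  cases hs : s.toList with
  | nil => simp
  | cons c0 rest =>
      simp only [pv_reserved_eq, reduceCtorEq, if_false]
      by_cases hres :
          (["t", "f", "true", "false", "null", "nil", "_"] : List String).contains s = true
      · rw [if_pos hres, if_pos hres]
      · rw [if_neg hres, if_neg hres, pv_start_mem]
        by_cases hstart : pvReStart c0 = true
        · rw [if_neg (not_not_intro hstart), pv_start_not_digit c0 hstart,
            pv_start_not_dash c0 hstart, if_neg (by simp), pv_loop_all]
          simp [pvReFullmatch, hstart, pv_start_cont c0 hstart]
        · rw [if_pos (by simp [hstart])]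
          simp [pvReFullmatch, hstart]
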